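-- pv_equiv track=rewrite | github.com/Yash-sudo-ops/nn-gpt | ab/gpt/TuneRL.py | _is_minimal_backbone_classifier_template
-- ===== SOURCE A (Python) =====
-- import textwrap
--
-- def _is_minimal_backbone_classifier_template(init_code: str) -> bool:
--     significant_lines = []
--     for raw_line in textwrap.dedent(init_code or "").splitlines():
--         line = raw_line.strip()
--         if not line or line.startswith("#"):
--             continue
--         if line.startswith(
--             (
--                 "def __init__",
--                 "super().__init__",
--                 "self.device",
--                 "self.use_amp",
--                 "self._input_spec",
--                 "self.pattern",
--                 "self.infer_dimensions",
--             )
--         ):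
--             continue
--         significant_lines.append(line)
--     assignment_lines = [line for line in significant_lines if line.startswith("self.")]
--     if len(assignment_lines) > 3:
--         return False
--     has_backbone_a = any("self.backbone_a" in line for line in assignment_lines)
--     has_backbone_b = any("self.backbone_b" in line for line in assignment_lines)
--     has_classifier = any("self.classifier" in line for line in assignment_lines)
--     if not (has_backbone_a and has_backbone_b and has_classifier):
--         return False
--     non_core_assignments = [
--         line
--         for line in assignment_lines
--         if all(token not in line for token in ("self.backbone_a", "self.backbone_b", "self.classifier"))
--     ]
--     return not non_core_assignments
-- ===== SOURCE B (Python) =====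
-- import textwrap
--
-- _SKIP_PREFIXES = (
--     "def __init__",
--     "super().__init__",
--     "self.device",
--     "self.use_amp",
--     "self._input_spec",
--     "self.pattern",
--     "self.infer_dimensions",
-- )
-- _CORE_TOKENS = ("self.backbone_a", "self.backbone_b", "self.classifier")
--
--
-- def _is_minimal_backbone_classifier_template(init_code: str) -> bool:
--     # Single pass over the dedented lines: count assignments and track flags,
--     # with no intermediate lists and no separate any()/filter scans.
--     count = 0
--     has_a = has_b = has_c = False
--     saw_non_core = False
--     for raw_line in textwrap.dedent(init_code or "").splitlines():
--         line = raw_line.strip()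
--         if not line or line.startswith("#") or line.startswith(_SKIP_PREFIXES):
--             continue
--         if not line.startswith("self."):
--             continue
--         count += 1
--         a = _CORE_TOKENS[0] in line
--         b = _CORE_TOKENS[1] in line
--         c = _CORE_TOKENS[2] in line
--         has_a = has_a or a
--         has_b = has_b or b
--         has_c = has_c or c
--         saw_non_core = saw_non_core or not (a or b or c)
--     return count <= 3 and has_a and has_b and has_c and not saw_non_core
-- ===== Notes on version B (the rewrite author's own statement) =====
-- stated objective: simpler
-- what changed: Replaces A's multi-pass pipeline (build a significant-lines list, filter assignment lines, three separate any() scans plus a fourth non-core filter) with a single pass over the dedented lines maintaining a counter and four booleans.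
import Mathlib
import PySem

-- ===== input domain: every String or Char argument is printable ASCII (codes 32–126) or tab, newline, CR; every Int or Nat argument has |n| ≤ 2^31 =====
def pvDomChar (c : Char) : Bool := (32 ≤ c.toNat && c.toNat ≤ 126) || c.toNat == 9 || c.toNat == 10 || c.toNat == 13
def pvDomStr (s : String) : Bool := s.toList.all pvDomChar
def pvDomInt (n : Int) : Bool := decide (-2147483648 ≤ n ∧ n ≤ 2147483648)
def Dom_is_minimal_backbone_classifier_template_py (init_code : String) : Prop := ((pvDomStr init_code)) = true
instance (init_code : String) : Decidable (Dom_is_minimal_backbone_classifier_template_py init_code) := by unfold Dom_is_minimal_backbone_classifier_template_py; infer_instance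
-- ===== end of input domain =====

-- B replaces A's multi-pass pipeline (significant-lines list, assignment filter, three any() scans,
-- a non-core filter) with one pass over the dedented lines keeping a counter and four flags; same result.


-- ===== PORT A =====
-- hand port of textwrap.dedent (CPython 3.11), exact on the domain: operates on '\n'-separated
-- lines; whitespace-only ([ \t]+) lines are blanked, the common [ \t] margin of the remaining
-- nonempty lines is computed and stripped from every line that starts with it.
def pvIsWsChar (c : Char) : Bool := c == ' ' || c == '\t'

-- margin[:i] at the first differing position (both earlier prefix branches failed, so it exists)
def pvCommonPrefix : List Char → List Char → List Char
  | x :: xs, y :: ys => if x == y then x :: pvCommonPrefix xs ys else []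
  | _, _ => []

def pvDedent (t : List Char) : List Char :=
  -- text = _whitespace_only_re.sub('', text)
  let ls := (PySem.Chars.splitOn t ['\n']).map (fun l => if l.all pvIsWsChar then [] else l)
  -- indents = _leading_whitespace_re.findall(text)   (lines with a non-[ \t] char, '\r' included)
  let indents := ls.filterMap (fun l =>
    if l.any (fun c => !pvIsWsChar c) then some (l.takeWhile pvIsWsChar) else none)
  let margin := indents.foldl (fun m i =>
    match m with
    | none => some i
    | some m => if m.isPrefixOf i then some m
                else if i.isPrefixOf m then some i
                else some (pvCommonPrefix m i)) none
  -- if margin: text = re.sub(r'(?m)^' + margin, '', text)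
  let ls' := match margin with
    | some m => if m.isEmpty then ls
                else ls.map (fun l => if m.isPrefixOf l then l.drop m.length else l)
    | none => ls
  PySem.Chars.join ['\n'] ls'

def pvSkipPrefixes : List (List Char) :=
  ["def __init__".toList, "super().__init__".toList, "self.device".toList, "self.use_amp".toList,
   "self._input_spec".toList, "self.pattern".toList, "self.infer_dimensions".toList]

def pvTokens : List (List Char) :=
  ["self.backbone_a".toList, "self.backbone_b".toList, "self.classifier".toList]

def is_minimal_backbone_classifier_template_py (init_code : String) : Bool :=
  -- `init_code or ""` is the identity on str (falsy str = ""), so it is ported as init_code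
  let significant : List (List Char) :=
    (PySem.Chars.splitlines (pvDedent init_code.toList)).foldl
      (fun acc raw =>
        let line := PySem.Chars.strip raw
        if line.isEmpty || PySem.Chars.startswith line ("#".toList) then acc
        else if pvSkipPrefixes.any (fun p => PySem.Chars.startswith line p) then acc
        else acc ++ [line]) []
  let assignment := significant.filter (fun l => PySem.Chars.startswith l ("self.".toList))
  if assignment.length > 3 then false
  else
    let ha := assignment.any (fun l => PySem.Chars.isIn ("self.backbone_a".toList) l)
    let hb := assignment.any (fun l => PySem.Chars.isIn ("self.backbone_b".toList) l)
    let hc := assignment.any (fun l => PySem.Chars.isIn ("self.classifier".toList) l)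
    if !(ha && hb && hc) then false
    else
      let nonCore := assignment.filter
        (fun l => pvTokens.all (fun tk => !PySem.Chars.isIn tk l))
      nonCore.isEmpty

-- ===== PORT B =====
def pvStep (st : Nat × Bool × Bool × Bool × Bool) (raw : List Char) :
    Nat × Bool × Bool × Bool × Bool :=
  let line := PySem.Chars.strip raw
  if line.isEmpty || PySem.Chars.startswith line ("#".toList)
      || pvSkipPrefixes.any (fun p => PySem.Chars.startswith line p) then st
  else if !PySem.Chars.startswith line ("self.".toList) then st
  else
    let a := PySem.Chars.isIn ("self.backbone_a".toList) line
    let b := PySem.Chars.isIn ("self.backbone_b".toList) line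
    let c := PySem.Chars.isIn ("self.classifier".toList) line
    (st.1 + 1, st.2.1 || a, st.2.2.1 || b, st.2.2.2.1 || c, st.2.2.2.2 || !(a || b || c))

def is_minimal_backbone_classifier_template_py_alt (init_code : String) : Bool :=
  let st := (PySem.Chars.splitlines (pvDedent init_code.toList)).foldl pvStep
    (0, false, false, false, false)
  decide (st.1 ≤ 3) && st.2.1 && st.2.2.1 && st.2.2.2.1 && !st.2.2.2.2

-- ===== PRECONDITION & SPEC =====
def Spec_is_minimal_backbone_classifier_template_py (init_code : String) (out : Bool) : Prop := out = is_minimal_backbone_classifier_template_py_alt init_code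
instance (init_code : String) (out : Bool) : Decidable (Spec_is_minimal_backbone_classifier_template_py init_code out) := by unfold Spec_is_minimal_backbone_classifier_template_py; infer_instance

-- ===== CLAIM (what is proved, stated in full; the proofs are below) =====
def Claim_equal_is_minimal_backbone_classifier_template_py : Prop := ∀ (init_code : String), Dom_is_minimal_backbone_classifier_template_py init_code → Spec_is_minimal_backbone_classifier_template_py init_code (is_minimal_backbone_classifier_template_py init_code)

-- ===== LEMMAS AND PROOFS =====

-- a line kept by A's first loop
def pvKeep (line : List Char) : Bool :=
  !(line.isEmpty || PySem.Chars.startswith line ("#".toList))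
    && !(pvSkipPrefixes.any (fun p => PySem.Chars.startswith line p))

-- a kept assignment line
def pvAsg (line : List Char) : Bool :=
  pvKeep line && PySem.Chars.startswith line ("self.".toList)

def pvA (l : List Char) : Bool := PySem.Chars.isIn ("self.backbone_a".toList) l
def pvB (l : List Char) : Bool := PySem.Chars.isIn ("self.backbone_b".toList) l
def pvC (l : List Char) : Bool := PySem.Chars.isIn ("self.classifier".toList) l

theorem sigFold (lines : List (List Char)) (acc : List (List Char)) :
    lines.foldl
      (fun acc raw =>
        let line := PySem.Chars.strip raw
        if line.isEmpty || PySem.Chars.startswith line ("#".toList) then acc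
        else if pvSkipPrefixes.any (fun p => PySem.Chars.startswith line p) then acc
        else acc ++ [line]) acc
      = acc ++ (lines.map PySem.Chars.strip).filter pvKeep := by
  induction lines generalizing acc with
  | nil => rw [List.foldl_nil, List.map_nil, List.filter_nil, List.append_nil]
  | cons raw rest ih =>
    rw [List.foldl_cons, List.map_cons, List.filter_cons]
    show List.foldl _
        (if (PySem.Chars.strip raw).isEmpty
              || PySem.Chars.startswith (PySem.Chars.strip raw) ("#".toList) then acc
         else if pvSkipPrefixes.any (fun p => PySem.Chars.startswith (PySem.Chars.strip raw) p)
           then acc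
         else acc ++ [PySem.Chars.strip raw]) rest = _
    by_cases h1 : ((PySem.Chars.strip raw).isEmpty
        || PySem.Chars.startswith (PySem.Chars.strip raw) ("#".toList)) = true
    · have hk : pvKeep (PySem.Chars.strip raw) = false := by
        unfold pvKeep; rw [h1]; rfl
      rw [if_pos h1, hk, ih]
      rfl
    · by_cases h2 : (pvSkipPrefixes.any
          (fun p => PySem.Chars.startswith (PySem.Chars.strip raw) p)) = true
      · have hk : pvKeep (PySem.Chars.strip raw) = false := by
          unfold pvKeep; rw [h2, Bool.not_true, Bool.and_false]
        rw [if_neg h1, if_pos h2, hk, ih]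
        rfl
      · have hk : pvKeep (PySem.Chars.strip raw) = true := by
          unfold pvKeep
          rw [Bool.eq_false_iff.mpr h1, Bool.eq_false_iff.mpr h2]
          rfl
        rw [if_neg h1, if_neg h2, hk, ih]
        simp

theorem bLoop (lines : List (List Char)) (st : Nat × Bool × Bool × Bool × Bool) :
    lines.foldl pvStep st =
      (st.1 + ((lines.map PySem.Chars.strip).filter pvAsg).length,
       st.2.1 || ((lines.map PySem.Chars.strip).filter pvAsg).any pvA,
       st.2.2.1 || ((lines.map PySem.Chars.strip).filter pvAsg).any pvB,
       st.2.2.2.1 || ((lines.map PySem.Chars.strip).filter pvAsg).any pvC,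
       st.2.2.2.2 || ((lines.map PySem.Chars.strip).filter pvAsg).any
         (fun l => !(pvA l || pvB l || pvC l))) := by
  induction lines generalizing st with
  | nil => simp only [List.foldl_nil, List.map_nil, List.filter_nil, List.length_nil,
      List.any_nil, Nat.add_zero, Bool.or_false]
  | cons raw rest ih =>
    rw [List.foldl_cons]
    by_cases h1 : ((PySem.Chars.strip raw).isEmpty
        || PySem.Chars.startswith (PySem.Chars.strip raw) ("#".toList)) = true
    · have ha : pvAsg (PySem.Chars.strip raw) = false := by
        unfold pvAsg pvKeep; rw [h1]; rfl
      have hstep : pvStep st raw = st := by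
        unfold pvStep; dsimp only; rw [h1, Bool.true_or]; rfl
      have hfilt : ((raw :: rest).map PySem.Chars.strip).filter pvAsg
          = (rest.map PySem.Chars.strip).filter pvAsg := by
        simp [ha]
      rw [hstep, ih, hfilt]
    · have h1f := Bool.eq_false_iff.mpr h1
      by_cases h2 : (pvSkipPrefixes.any
          (fun p => PySem.Chars.startswith (PySem.Chars.strip raw) p)) = true
      · have ha : pvAsg (PySem.Chars.strip raw) = false := by
          unfold pvAsg pvKeep; rw [h2, Bool.not_true, Bool.and_false, Bool.false_and]
        have hstep : pvStep st raw = st := by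
          unfold pvStep; dsimp only; rw [h1f, Bool.false_or, h2]; rfl
        have hfilt : ((raw :: rest).map PySem.Chars.strip).filter pvAsg
            = (rest.map PySem.Chars.strip).filter pvAsg := by
          simp [ha]
        rw [hstep, ih, hfilt]
      · have h2f := Bool.eq_false_iff.mpr h2
        by_cases h3 : PySem.Chars.startswith (PySem.Chars.strip raw) ("self.".toList) = true
        · have ha : pvAsg (PySem.Chars.strip raw) = true := by
            unfold pvAsg pvKeep
            rw [h1f, h2f, h3]
            rfl
          have hstep : pvStep st raw =
              (st.1 + 1, st.2.1 || pvA (PySem.Chars.strip raw),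
               st.2.2.1 || pvB (PySem.Chars.strip raw),
               st.2.2.2.1 || pvC (PySem.Chars.strip raw),
               st.2.2.2.2 || !(pvA (PySem.Chars.strip raw) || pvB (PySem.Chars.strip raw)
                 || pvC (PySem.Chars.strip raw))) := by
            unfold pvStep pvA pvB pvC
            dsimp only
            rw [h1f, Bool.false_or, h2f, h3, Bool.not_true]
            rfl
          have hfilt : ((raw :: rest).map PySem.Chars.strip).filter pvAsg
              = PySem.Chars.strip raw :: (rest.map PySem.Chars.strip).filter pvAsg := by
            simp [ha]
          rw [hstep, ih, hfilt]
          have hn : st.1 + 1 + ((rest.map PySem.Chars.strip).filter pvAsg).length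
              = st.1 + (((rest.map PySem.Chars.strip).filter pvAsg).length + 1) := by omega
          simp only [List.length_cons, List.any_cons, Bool.or_assoc, hn]
        · have h3f := Bool.eq_false_iff.mpr h3
          have ha : pvAsg (PySem.Chars.strip raw) = false := by
            unfold pvAsg
            rw [h3f, Bool.and_false]
          have hstep : pvStep st raw = st := by
            unfold pvStep
            dsimp only
            rw [h1f, Bool.false_or, h2f, h3f, Bool.not_false]
            rfl
          have hfilt : ((raw :: rest).map PySem.Chars.strip).filter pvAsg
              = (rest.map PySem.Chars.strip).filter pvAsg := by
            simp [ha]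
          rw [hstep, ih, hfilt]

theorem filter_asg (lines : List (List Char)) :
    ((lines.map PySem.Chars.strip).filter pvKeep).filter
        (fun l => PySem.Chars.startswith l ("self.".toList))
      = (lines.map PySem.Chars.strip).filter pvAsg := by
  rw [List.filter_filter]
  refine List.filter_congr (fun a _ => ?_)
  exact Bool.and_comm _ _

theorem nonCore_empty (L : List (List Char)) :
    (L.filter (fun l => pvTokens.all (fun tk => !PySem.Chars.isIn tk l))).isEmpty
      = !L.any (fun l => !(pvA l || pvB l || pvC l)) := by
  induction L with
  | nil => rfl
  | cons x xs ih =>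
    rw [List.filter_cons, List.any_cons]
    have htok : (pvTokens.all (fun tk => !PySem.Chars.isIn tk x))
        = !(pvA x || pvB x || pvC x) := by
      show (!pvA x && (!pvB x && (!pvC x && true))) = _
      cases pvA x <;> cases pvB x <;> cases pvC x <;> rfl
    rw [htok]
    by_cases h : (pvA x || pvB x || pvC x) = true
    · rw [h, Bool.not_true, Bool.false_or, if_neg (by simp), ih]
    · rw [Bool.eq_false_iff.mpr h, Bool.not_false, Bool.true_or, if_pos rfl]
      rfl

theorem main_eq (lines : List (List Char)) :
    (let significant := lines.foldl
        (fun acc raw =>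
          let line := PySem.Chars.strip raw
          if line.isEmpty || PySem.Chars.startswith line ("#".toList) then acc
          else if pvSkipPrefixes.any (fun p => PySem.Chars.startswith line p) then acc
          else acc ++ [line]) []
     let assignment := significant.filter (fun l => PySem.Chars.startswith l ("self.".toList))
     if assignment.length > 3 then false
     else
       let ha := assignment.any (fun l => PySem.Chars.isIn ("self.backbone_a".toList) l)
       let hb := assignment.any (fun l => PySem.Chars.isIn ("self.backbone_b".toList) l)
       let hc := assignment.any (fun l => PySem.Chars.isIn ("self.classifier".toList) l)
       if !(ha && hb && hc) then false
       else
         let nonCore := assignment.filter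
           (fun l => pvTokens.all (fun tk => !PySem.Chars.isIn tk l))
         nonCore.isEmpty)
    = (let st := lines.foldl pvStep (0, false, false, false, false)
       decide (st.1 ≤ 3) && st.2.1 && st.2.2.1 && st.2.2.2.1 && !st.2.2.2.2) := by
  show (let assignment := (lines.foldl
        (fun acc raw =>
          let line := PySem.Chars.strip raw
          if line.isEmpty || PySem.Chars.startswith line ("#".toList) then acc
          else if pvSkipPrefixes.any (fun p => PySem.Chars.startswith line p) then acc
          else acc ++ [line]) []).filter
          (fun l => PySem.Chars.startswith l ("self.".toList))
      if assignment.length > 3 then false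
      else if !(assignment.any pvA && assignment.any pvB && assignment.any pvC) then false
      else (assignment.filter (fun l => pvTokens.all (fun tk => !PySem.Chars.isIn tk l))).isEmpty)
    = _
  rw [sigFold, List.nil_append, filter_asg, bLoop]
  set L := (lines.map PySem.Chars.strip).filter pvAsg with hL
  show (if L.length > 3 then false
        else if !(L.any pvA && L.any pvB && L.any pvC) then false
        else (L.filter (fun l => pvTokens.all (fun tk => !PySem.Chars.isIn tk l))).isEmpty)
    = (decide (0 + L.length ≤ 3) && (false || L.any pvA) && (false || L.any pvB)
        && (false || L.any pvC) && !(false || L.any (fun l => !(pvA l || pvB l || pvC l))))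
  rw [Nat.zero_add, Bool.false_or, Bool.false_or, Bool.false_or, Bool.false_or]
  by_cases hlen : L.length > 3
  · rw [if_pos hlen, decide_eq_false (by omega), Bool.false_and, Bool.false_and,
      Bool.false_and, Bool.false_and]
  · rw [if_neg hlen, decide_eq_true (by omega), Bool.true_and]
    by_cases hcore : (L.any pvA && L.any pvB && L.any pvC) = true
    · obtain ⟨⟨ha, hb⟩, hc⟩ : (L.any pvA = true ∧ L.any pvB = true) ∧ L.any pvC = true := by
        simpa [Bool.and_eq_true] using hcore
      rw [hcore, Bool.not_true, if_neg (by simp), nonCore_empty]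
      simp [ha, hb, hc]
    · rw [Bool.eq_false_iff.mpr hcore, Bool.not_false, if_pos rfl, Bool.false_and]

-- ===== VERDICT (by name: the statement is the Claim_ definition above) =====
set_option maxHeartbeats 2000000 in
theorem is_minimal_backbone_classifier_template_py_spec : Claim_equal_is_minimal_backbone_classifier_template_py := by
  intro init_code _
  unfold Spec_is_minimal_backbone_classifier_template_py
  unfold is_minimal_backbone_classifier_template_py is_minimal_backbone_classifier_template_py_alt
  exact main_eq (PySem.Chars.splitlines (pvDedent init_code.toList))
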